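-- pv_equiv track=rewrite | github.com/pisaltejas/Dsa-Training-Synclovis | SIVAKUMAR S/scrum-32-Policemencatchthieves.py | catchThieves
-- ===== SOURCE A (Python) =====
-- def catchThieves(arr, k):
--     n = len(arr)
--     policemen = []
--     thieves = []
--
--     for i in range(n):
--         if arr[i] == 'P':
--             policemen.append(i)
--         else:
--             thieves.append(i)
--
--     policemen.sort()
--     thieves.sort()
--
--     i = j = 0
--     caught = 0
--
--     while i < len(policemen) and j < len(thieves):
--         if abs(policemen[i] - thieves[j]) <= k:
--             caught += 1
--             i += 1
--             j += 1
--         else: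
--             if policemen[i] < thieves[j]:
--                 i += 1
--             else:
--                 j += 1
--
--     return caught
-- ===== SOURCE B (Python) =====
-- def catchThieves(arr, k):
--     # Single left-to-right online pass. At any moment all still-unmatched
--     # indices are of ONE kind (police or thieves); they live in q[head:],
--     # a list used as a FIFO queue with a head pointer. Fronts farther than
--     # k from the current index are expired; a new element either catches
--     # the front of the opposite kind or joins the queue.
--     q = []
--     head = 0
--     kind = None          # kind of the queued indices; only read while the queue is nonempty
--     caught = 0
--     for i, c in enumerate(arr):
--         t = (c == 'P')
--         while head < len(q) and q[head] < i - k: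
--             head += 1
--         if head < len(q) and kind != t:
--             head += 1
--             caught += 1
--         else:
--             if head == len(q):
--                 kind = t
--             q.append(i)
--     return caught
-- ===== Notes on version B (the rewrite author's own statement) =====
-- stated objective: alternative
-- what changed: Replaces A's build-two-index-lists + sort + two-pointer scan by a single online left-to-right pass keeping one FIFO queue (a list with a head pointer) of still-unmatched indices, all of one kind: fronts farther than k from the current index are expired, and each arriving element either catches the front of the opposite kind or joins the queue.
import Mathlib
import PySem

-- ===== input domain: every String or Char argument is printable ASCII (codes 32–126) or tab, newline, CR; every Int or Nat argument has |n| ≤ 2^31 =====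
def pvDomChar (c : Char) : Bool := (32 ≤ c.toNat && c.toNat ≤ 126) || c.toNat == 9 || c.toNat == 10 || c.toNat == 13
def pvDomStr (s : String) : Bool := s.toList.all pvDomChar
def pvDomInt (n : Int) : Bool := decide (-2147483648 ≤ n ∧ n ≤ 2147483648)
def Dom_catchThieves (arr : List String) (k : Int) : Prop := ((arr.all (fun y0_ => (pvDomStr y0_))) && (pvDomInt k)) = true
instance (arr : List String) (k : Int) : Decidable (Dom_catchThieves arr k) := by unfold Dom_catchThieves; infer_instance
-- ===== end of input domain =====

-- B replaces A's build-two-lists + sort + two-pointer scan by a single online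
-- left-to-right pass keeping one FIFO queue of still-unmatched indices (objective: alternative).

-- ===== PORT A =====
-- A's while loop over the two sorted index lists; the pointers i, j become
-- structural recursion on the two lists, caught is the accumulator.
def loopA (k : Int) : List Int → List Int → Int → Int
  | p :: ps, t :: ts, caught =>
      if |p - t| ≤ k then loopA k ps ts (caught + 1)
      else if p < t then loopA k ps (t :: ts) caught
      else loopA k (p :: ps) ts caught
  | _, _, caught => caught
termination_by ps ts _ => ps.length + ts.length
decreasing_by all_goals simp <;> omega

def catchThieves (arr : List String) (k : Int) : Int :=
  let n : Int := (arr.length : Int)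
  -- for i in range(n): arr[i] — i is always in range, so pyGetD's default "" is never used
  let pt := (PySem.List.pyRange 0 n 1).foldl
    (fun (st : List Int × List Int) i =>
      if PySem.List.pyGetD arr i "" == "P" then (st.1 ++ [i], st.2) else (st.1, st.2 ++ [i]))
    ([], [])
  let policemen := PySem.List.sorted pt.1 (fun x => x) false
  let thieves := PySem.List.sorted pt.2 (fun x => x) false
  loopA k policemen thieves 0

-- ===== PORT B =====
-- B's `while head < len(q) and q[head] < i - k: head += 1` loop
def bAdvance (q : List Int) (bound : Int) (head : Nat) : Nat :=
  if h : head < q.length then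
    (if q[head] < bound then bAdvance q bound (head + 1) else head)
  else head
termination_by q.length - head

-- B's for loop over enumerate(arr); q with its head pointer is the queue,
-- kind the kind of its live elements q[head:]
def loopB (k : Int) : List (Int × String) → List Int → Nat → Bool → Int → Int
  | [], _, _, _, caught => caught
  | (i, c) :: rest, q, head, kind, caught =>
      let t := c == "P"
      let head' := bAdvance q (i - k) head
      if head' < q.length then
        (if kind ≠ t then loopB k rest q (head' + 1) kind (caught + 1)
         else loopB k rest (q ++ [i]) head' kind caught)
      else loopB k rest (q ++ [i]) head' t caught

def catchThieves_alt (arr : List String) (k : Int) : Int :=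
  -- kind = None is only read while the queue is nonempty; false stands for the unread initial value
  loopB k (PySem.List.enumerate arr 0) [] 0 false 0

-- ===== PRECONDITION & SPEC =====
def Spec_catchThieves (arr : List String) (k : Int) (out : Int) : Prop := out = catchThieves_alt arr k
instance (arr : List String) (k : Int) (out : Int) : Decidable (Spec_catchThieves arr k out) := by unfold Spec_catchThieves; infer_instance

-- ===== CLAIM (what is proved, stated in full; the proofs are below) =====
def Claim_equal_catchThieves : Prop := ∀ (arr : List String) (k : Int), Dom_catchThieves arr k → Spec_catchThieves arr k (catchThieves arr k)

-- ===== LEMMAS AND PROOFS =====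

-- proof-side model of B: the live queue q[head:] materialised as a list
def scanQ (k : Int) : List (Int × String) → List Int → Bool → Int → Int
  | [], _, _, caught => caught
  | (i, c) :: rest, q, kind, caught =>
      let t := c == "P"
      match q.dropWhile (fun x => decide (x < i - k)) with
      | [] => scanQ k rest [i] t caught
      | x :: q2 =>
        if kind ≠ t then scanQ k rest q2 kind (caught + 1)
        else scanQ k rest (x :: q2 ++ [i]) kind caught

-- indices of the 'P' entries / of the non-'P' entries of an enumerated suffix
def psOf (l : List (Int × String)) : List Int := (l.filter (fun p => p.2 == "P")).map Prod.fst
def tsOf (l : List (Int × String)) : List Int := (l.filter (fun p => !(p.2 == "P"))).map Prod.fst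

theorem psOf_nil : psOf [] = [] := rfl
theorem tsOf_nil : tsOf [] = [] := rfl
theorem psOf_cons (p : Int × String) (l : List (Int × String)) :
    psOf (p :: l) = if p.2 == "P" then p.1 :: psOf l else psOf l := by
  simp [psOf, List.filter_cons]; split <;> simp_all
theorem tsOf_cons (p : Int × String) (l : List (Int × String)) :
    tsOf (p :: l) = if p.2 == "P" then tsOf l else p.1 :: tsOf l := by
  simp [tsOf, List.filter_cons]; split <;> simp_all

theorem mem_psOf {l : List (Int × String)} {y : Int} (h : y ∈ psOf l) :
    ∃ p ∈ l, p.1 = y := by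
  simp only [psOf, List.mem_map, List.mem_filter] at h
  obtain ⟨p, ⟨hp, _⟩, he⟩ := h; exact ⟨p, hp, he⟩
theorem mem_tsOf {l : List (Int × String)} {y : Int} (h : y ∈ tsOf l) :
    ∃ p ∈ l, p.1 = y := by
  simp only [tsOf, List.mem_map, List.mem_filter] at h
  obtain ⟨p, ⟨hp, _⟩, he⟩ := h; exact ⟨p, hp, he⟩

theorem loopA_nil_left (k : Int) (ts : List Int) (c : Int) : loopA k [] ts c = c := by
  cases ts <;> simp [loopA]
theorem loopA_nil_right (k : Int) (ps : List Int) (c : Int) : loopA k ps [] c = c := by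
  cases ps <;> simp [loopA]

theorem loopA_match (k p t : Int) (ps ts : List Int) (c : Int) (h : |p - t| ≤ k) :
    loopA k (p :: ps) (t :: ts) c = loopA k ps ts (c + 1) := by
  simp [loopA, h]

theorem loopA_drop_left (k p t : Int) (ps ts : List Int) (c : Int)
    (h1 : p < t - k) (h2 : p < t) :
    loopA k (p :: ps) (t :: ts) c = loopA k ps (t :: ts) c := by
  have habs : |p - t| = t - p := by rw [abs_sub_comm]; exact abs_of_nonneg (by omega)
  have : ¬ |p - t| ≤ k := by omega
  simp [loopA, this, h2]

theorem loopA_drop_right (k p t : Int) (ps ts : List Int) (c : Int)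
    (h1 : t < p - k) (h2 : t < p) :
    loopA k (p :: ps) (t :: ts) c = loopA k (p :: ps) ts c := by
  have habs : |p - t| = p - t := abs_of_nonneg (by omega)
  have h3 : ¬ |p - t| ≤ k := by omega
  have h4 : ¬ p < t := by omega
  simp [loopA, h3, h4]

theorem loopA_drop_left_prefix (k t : Int) (ts : List Int) (c : Int) :
    ∀ (pre ps : List Int), (∀ x ∈ pre, x < t - k ∧ x < t) →
    loopA k (pre ++ ps) (t :: ts) c = loopA k ps (t :: ts) c := by
  intro pre
  induction pre with
  | nil => intro ps _; rfl
  | cons a pre ih =>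
      intro ps h
      have ha := h a (by simp)
      rw [List.cons_append, loopA_drop_left k a t _ ts c ha.1 ha.2]
      exact ih ps (fun x hx => h x (by simp [hx]))

theorem loopA_drop_right_prefix (k p : Int) (ps : List Int) (c : Int) :
    ∀ (pre ts : List Int), (∀ x ∈ pre, x < p - k ∧ x < p) →
    loopA k (p :: ps) (pre ++ ts) c = loopA k (p :: ps) ts c := by
  intro pre
  induction pre with
  | nil => intro ts _; rfl
  | cons a pre ih =>
      intro ts h
      have ha := h a (by simp)
      rw [List.cons_append, loopA_drop_right k p a ps _ c ha.1 ha.2]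
      exact ih ts (fun x hx => h x (by simp [hx]))

-- the single-queue online scan computes exactly what the two-pointer scan computes
theorem scanQ_eq (k : Int) :
    ∀ (rest : List (Int × String)) (q : List Int) (kind : Bool) (c : Int),
    (∀ x ∈ q, ∀ y ∈ rest, x < y.1) →
    rest.Pairwise (fun a b => a.1 < b.1) →
    scanQ k rest q kind c =
      if kind then loopA k (q ++ psOf rest) (tsOf rest) c
              else loopA k (psOf rest) (q ++ tsOf rest) c := by
  intro rest
  induction rest with
  | nil =>
      intro q kind c _ _
      cases kind <;> simp [scanQ, psOf_nil, tsOf_nil, loopA_nil_left, loopA_nil_right]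
  | cons hd rest ih =>
      obtain ⟨i, s⟩ := hd
      intro q kind c hq hs
      have hrest : ∀ y ∈ rest, i < y.1 := by
        intro y hy; exact (List.pairwise_cons.mp hs).1 y hy
      have hs' : rest.Pairwise (fun a b => a.1 < b.1) := (List.pairwise_cons.mp hs).2
      have hq' : ∀ x ∈ q, x < i := fun x hx => hq x hx (i, s) (by simp)
      have hqrest : ∀ x ∈ q, ∀ y ∈ rest, x < y.1 :=
        fun x hx y hy => hq x hx y (by simp [hy])
      have hps : ∀ y ∈ psOf rest, i < y := by
        intro y hy; obtain ⟨p, hp, he⟩ := mem_psOf hy; exact he ▸ hrest p hp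
      have hts : ∀ y ∈ tsOf rest, i < y := by
        intro y hy; obtain ⟨p, hp, he⟩ := mem_tsOf hy; exact he ▸ hrest p hp
      have hpre : ∀ x ∈ q.takeWhile (fun x => decide (x < i - k)), x < i - k ∧ x < i := by
        intro x hx
        refine ⟨by simpa using List.mem_takeWhile_imp hx, hq' x ((List.takeWhile_sublist _).subset hx)⟩
      rw [scanQ]
      cases hdw : q.dropWhile (fun x => decide (x < i - k)) with
      | nil =>
          have hall : ∀ x ∈ q, x < i - k := by
            have := List.dropWhile_eq_nil_iff.mp hdw
            intro x hx; simpa using this x hx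
          rw [ih [i] (s == "P") c (by intro x hx y hy; simp at hx; subst hx; exact hrest y hy) hs']
          cases he : (s == "P") with
          | true =>
              simp only [psOf_cons, tsOf_cons, he, if_true]
              cases kind with
              | true =>
                  simp only [if_true]
                  cases hcase : tsOf rest with
                  | nil => rw [loopA_nil_right, loopA_nil_right]
                  | cons t0 ts' =>
                      have ht0 : i < t0 := hts t0 (by rw [hcase]; simp)
                      rw [loopA_drop_left_prefix k t0 ts' c q (i :: psOf rest)
                            (fun x hx => ⟨by have := hall x hx; omega, by have := hq' x hx; omega⟩)]
                      rfl
              | false =>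
                  simp only [Bool.false_eq_true, if_false]
                  rw [loopA_drop_right_prefix k i (psOf rest) c q (tsOf rest)
                        (fun x hx => ⟨hall x hx, hq' x hx⟩)]
                  rfl
          | false =>
              simp only [psOf_cons, tsOf_cons, he, Bool.false_eq_true, if_false]
              cases kind with
              | true =>
                  simp only [if_true]
                  rw [loopA_drop_left_prefix k i (tsOf rest) c q (psOf rest)
                        (fun x hx => ⟨hall x hx, hq' x hx⟩)]
                  rfl
              | false =>
                  simp only [Bool.false_eq_true, if_false]
                  cases hcase : psOf rest with
                  | nil => rw [loopA_nil_left, loopA_nil_left]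
                  | cons p0 ps' =>
                      have hp0 : i < p0 := hps p0 (by rw [hcase]; simp)
                      rw [loopA_drop_right_prefix k p0 ps' c q (i :: tsOf rest)
                            (fun x hx => ⟨by have := hall x hx; omega, by have := hq' x hx; omega⟩)]
                      rfl
      | cons x q2 =>
          have hxq : x ∈ q := (List.dropWhile_sublist _).subset (by rw [hdw]; simp)
          have hq2q : ∀ z ∈ q2, z ∈ q := by
            intro z hz; exact (List.dropWhile_sublist _).subset (by rw [hdw]; simp [hz])
          have hxk : ¬ x < i - k := by
            have h1 : q.dropWhile (fun x => decide (x < i - k)) ≠ [] := by simp [hdw]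
            have := List.head_dropWhile_not (fun x => decide (x < i - k)) h1
            simpa [hdw] using this
          have hxi : x < i := hq' x hxq
          have habsxi : |i - x| ≤ k := by
            have : |i - x| = i - x := abs_of_nonneg (by omega)
            omega
          have habsxi' : |x - i| ≤ k := by rw [abs_sub_comm]; exact habsxi
          have hqsplit : q = q.takeWhile (fun x => decide (x < i - k)) ++ (x :: q2) := by
            conv_lhs => rw [← List.takeWhile_append_dropWhile
              (p := fun x => decide (x < i - k)) (l := q)]
            rw [hdw]
          have hnewq : ∀ z ∈ x :: q2 ++ [i], ∀ y ∈ rest, z < y.1 := by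
            intro z hz y hy
            rcases List.mem_append.mp hz with hz1 | hz2
            · rcases List.mem_cons.mp hz1 with rfl | h
              · exact hqrest z hxq y hy
              · exact hqrest z (hq2q z h) y hy
            · simp at hz2; subst hz2; exact hrest y hy
          cases he : (s == "P") with
          | true =>
              simp only [psOf_cons, tsOf_cons, he, if_true]
              cases kind with
              | true =>
                  simp only [ne_eq, not_true_eq_false, if_false]
                  rw [ih (x :: q2 ++ [i]) true c hnewq hs']
                  simp only [if_true]
                  cases hcase : tsOf rest with
                  | nil => rw [loopA_nil_right, loopA_nil_right]
                  | cons t0 ts' =>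
                      have ht0 : i < t0 := hts t0 (by rw [hcase]; simp)
                      conv_rhs => rw [hqsplit]
                      rw [show (q.takeWhile (fun x => decide (x < i - k)) ++ (x :: q2)) ++ i :: psOf rest
                            = q.takeWhile (fun x => decide (x < i - k)) ++ (x :: (q2 ++ i :: psOf rest)) by simp]
                      rw [loopA_drop_left_prefix k t0 ts' c (q.takeWhile (fun x => decide (x < i - k)))
                            (x :: (q2 ++ i :: psOf rest))
                            (fun z hz => ⟨by have := (hpre z hz).1; omega, by have := (hpre z hz).2; omega⟩)]
                      simp
              | false =>
                  simp only [ne_eq, Bool.false_eq_true, not_false_eq_true, if_true]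
                  rw [ih q2 false (c + 1) (fun z hz y hy => hqrest z (hq2q z hz) y hy) hs']
                  simp only [Bool.false_eq_true, if_false]
                  conv_rhs => rw [hqsplit]
                  rw [show (q.takeWhile (fun x => decide (x < i - k)) ++ (x :: q2)) ++ tsOf rest
                        = q.takeWhile (fun x => decide (x < i - k)) ++ (x :: (q2 ++ tsOf rest)) by simp]
                  rw [loopA_drop_right_prefix k i (psOf rest) c (q.takeWhile (fun x => decide (x < i - k)))
                        (x :: (q2 ++ tsOf rest)) hpre]
                  rw [loopA_match k i x (psOf rest) (q2 ++ tsOf rest) c habsxi]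
          | false =>
              simp only [psOf_cons, tsOf_cons, he, Bool.false_eq_true, if_false]
              cases kind with
              | true =>
                  simp only [ne_eq, Bool.true_eq_false, not_false_eq_true, if_true]
                  rw [ih q2 true (c + 1) (fun z hz y hy => hqrest z (hq2q z hz) y hy) hs']
                  simp only [if_true]
                  conv_rhs => rw [hqsplit]
                  rw [show (q.takeWhile (fun x => decide (x < i - k)) ++ (x :: q2)) ++ psOf rest
                        = q.takeWhile (fun x => decide (x < i - k)) ++ (x :: (q2 ++ psOf rest)) by simp]
                  rw [loopA_drop_left_prefix k i (tsOf rest) c (q.takeWhile (fun x => decide (x < i - k)))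
                        (x :: (q2 ++ psOf rest)) hpre]
                  rw [loopA_match k x i (q2 ++ psOf rest) (tsOf rest) c habsxi']
              | false =>
                  simp only [ne_eq, not_true_eq_false, if_false]
                  rw [ih (x :: q2 ++ [i]) false c hnewq hs']
                  simp only [Bool.false_eq_true, if_false]
                  cases hcase : psOf rest with
                  | nil => rw [loopA_nil_left, loopA_nil_left]
                  | cons p0 ps' =>
                      have hp0 : i < p0 := hps p0 (by rw [hcase]; simp)
                      conv_rhs => rw [hqsplit]
                      rw [show (q.takeWhile (fun x => decide (x < i - k)) ++ (x :: q2)) ++ i :: tsOf rest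
                            = q.takeWhile (fun x => decide (x < i - k)) ++ (x :: (q2 ++ i :: tsOf rest)) by simp]
                      rw [loopA_drop_right_prefix k p0 ps' c (q.takeWhile (fun x => decide (x < i - k)))
                            (x :: (q2 ++ i :: tsOf rest))
                            (fun z hz => ⟨by have := (hpre z hz).1; omega, by have := (hpre z hz).2; omega⟩)]
                      simp

theorem drop_bAdvance (q : List Int) (b : Int) :
    ∀ head : Nat, q.drop (bAdvance q b head) = (q.drop head).dropWhile (fun x => decide (x < b)) := by
  intro head
  fun_induction bAdvance q b head with
  | case1 head h hlt ih =>
      rw [ih, List.drop_eq_getElem_cons h, List.dropWhile_cons]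
      simp [hlt]
  | case2 head h hlt =>
      rw [List.drop_eq_getElem_cons h, List.dropWhile_cons]
      simp [hlt]
  | case3 head h =>
      have : q.drop head = [] := List.drop_eq_nil_of_le (by omega)
      rw [this]; rfl

theorem bAdvance_le (q : List Int) (b : Int) :
    ∀ head : Nat, head ≤ q.length → bAdvance q b head ≤ q.length := by
  intro head
  fun_induction bAdvance q b head with
  | case1 head h hlt ih => intro _; exact ih (by omega)
  | case2 head h hlt => intro hh; exact hh
  | case3 head h => intro hh; exact hh

-- the head-pointer loop computes what the materialised-queue scan computes
theorem loopB_eq_scanQ (k : Int) :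
    ∀ (rest : List (Int × String)) (q : List Int) (head : Nat) (kind : Bool) (c : Int),
    head ≤ q.length →
    loopB k rest q head kind c = scanQ k rest (q.drop head) kind c := by
  intro rest
  induction rest with
  | nil => intro q head kind c _; rfl
  | cons hd rest ih =>
      obtain ⟨i, s⟩ := hd
      intro q head kind c hh
      rw [loopB, scanQ]
      rw [← drop_bAdvance q (i - k) head]
      have hle : bAdvance q (i - k) head ≤ q.length := bAdvance_le q (i - k) head hh
      cases hdq : q.drop (bAdvance q (i - k) head) with
      | nil =>
          have hlen : q.length ≤ bAdvance q (i - k) head := by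
            by_contra hcon
            have := List.drop_eq_nil_iff.mp hdq
            omega
          have hnot : ¬ bAdvance q (i - k) head < q.length := by omega
          rw [if_neg hnot]
          rw [ih (q ++ [i]) (bAdvance q (i - k) head) (s == "P") c (by simp; omega)]
          have heq : bAdvance q (i - k) head = q.length := le_antisymm hle hlen
          rw [heq, List.drop_left]
      | cons x q2 =>
          have hlt : bAdvance q (i - k) head < q.length := by
            by_contra hcon
            rw [List.drop_eq_nil_of_le (by omega)] at hdq
            simp at hdq
          rw [if_pos hlt]
          have hdrop1 : q.drop (bAdvance q (i - k) head + 1) = q2 := by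
            have h1 : q.drop (bAdvance q (i - k) head + 1)
                = List.drop 1 (q.drop (bAdvance q (i - k) head)) := by
              rw [List.drop_drop]
            rw [h1, hdq]; rfl
          by_cases hkt : kind = (s == "P")
          · rw [if_neg (by simp [hkt])]
            rw [ih (q ++ [i]) (bAdvance q (i - k) head) kind c (by simp; omega)]
            rw [List.drop_append_of_le_length hle, hdq]
            simp [hkt]
          · rw [if_pos hkt]
            rw [ih q (bAdvance q (i - k) head + 1) kind (c + 1) (by omega)]
            rw [hdrop1]
            simp [hkt]

theorem partition_foldl (l : List (Int × String)) :
    ∀ (a b : List Int),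
    l.foldl (fun (st : List Int × List Int) (p : Int × String) =>
        if p.2 == "P" then (st.1 ++ [p.1], st.2) else (st.1, st.2 ++ [p.1])) (a, b)
      = (a ++ psOf l, b ++ tsOf l) := by
  induction l with
  | nil => intro a b; simp [psOf_nil, tsOf_nil]
  | cons p l ih =>
      intro a b
      rw [List.foldl_cons, psOf_cons, tsOf_cons]
      cases he : (p.2 == "P") with
      | true => simp only [if_true, ih]; simp
      | false => simp only [Bool.false_eq_true, if_false, ih]; simp

theorem main_eq (arr : List String) (k : Int) : catchThieves arr k = catchThieves_alt arr k := by
  have hfold : (PySem.List.pyRange 0 ((arr.length : Int)) 1).foldl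
      (fun (st : List Int × List Int) i =>
        if PySem.List.pyGetD arr i "" == "P" then (st.1 ++ [i], st.2) else (st.1, st.2 ++ [i]))
      ([], [])
      = (psOf (PySem.List.enumerate arr 0), tsOf (PySem.List.enumerate arr 0)) := by
    have henum := PySem.List.enumerate_eq_map_pyRange arr ""
    have hlen : PySem.List.len arr = ((arr.length : Int)) := by simp [PySem.List.len]
    rw [hlen] at henum
    rw [henum]
    have hm := @List.foldl_map Int (Int × String) (List Int × List Int)
      (fun j => (j, PySem.List.pyGetD arr j ""))
      (fun (st : List Int × List Int) (p : Int × String) =>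
        if p.2 == "P" then (st.1 ++ [p.1], st.2) else (st.1, st.2 ++ [p.1]))
      (PySem.List.pyRange 0 ((arr.length : Int)) 1) ([], [])
    exact (hm.symm.trans (partition_foldl _ [] [])).trans (by simp)
  have hpw := PySem.List.pairwise_lt_enumerate arr 0
  have hpsPW : (psOf (PySem.List.enumerate arr 0)).Pairwise (fun a b => a ≤ b) :=
    List.Pairwise.imp (fun h => le_of_lt h) ((hpw.filter _).map _ (fun a b h => h))
  have htsPW : (tsOf (PySem.List.enumerate arr 0)).Pairwise (fun a b => a ≤ b) :=
    List.Pairwise.imp (fun h => le_of_lt h) ((hpw.filter _).map _ (fun a b h => h))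
  show (let n : Int := (arr.length : Int);
    let pt := (PySem.List.pyRange 0 n 1).foldl
      (fun (st : List Int × List Int) i =>
        if PySem.List.pyGetD arr i "" == "P" then (st.1 ++ [i], st.2) else (st.1, st.2 ++ [i]))
      ([], []);
    let policemen := PySem.List.sorted pt.1 (fun x => x) false
    let thieves := PySem.List.sorted pt.2 (fun x => x) false
    loopA k policemen thieves 0) = loopB k (PySem.List.enumerate arr 0) [] 0 false 0
  simp only [hfold]
  rw [PySem.List.sorted_eq_self_of_pairwise _ _ hpsPW,
      PySem.List.sorted_eq_self_of_pairwise _ _ htsPW]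
  rw [loopB_eq_scanQ k (PySem.List.enumerate arr 0) [] 0 false 0 (by simp)]
  rw [show (List.drop 0 ([] : List Int)) = [] from rfl]
  rw [scanQ_eq k (PySem.List.enumerate arr 0) [] false 0 (by simp) hpw]
  simp

-- ===== VERDICT (by name: the statement is the Claim_ definition above) =====
theorem catchThieves_spec : Claim_equal_catchThieves := by
  intro arr k _
  unfold Spec_catchThieves
  exact main_eq arr k
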